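-- pv_equiv track=rewrite | github.com/TanviAgg/PicoloExtension | compbio/kmp.py | kmp_string_match
-- ===== SOURCE A (Python) =====
-- def compute_pi(pattern):
-- 	"""
-- 	computes the pi array for given pattern string
-- 	:param pattern: input pattern string of length m
-- 	:return: pi array for this pattern string (0 indexed)
-- 	"""
-- 	m = len(pattern)
-- 	pi = [0] * m
-- 	b = 0
-- 	for i in range(1, m):
-- 		while b > 0 and pattern[b] != pattern[i]:
-- 			b = pi[b-1]
-- 		if pattern[b] == pattern[i]:
-- 			b += 1
-- 		pi[i] = b
-- 	return pi
--
-- def kmp_string_match(text, pattern):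
-- 	"""
-- 	Using KMP algorithm to find all occurrences of the pattern in text
-- 	:param text: input text string
-- 	:param pattern: input pattern string
-- 	:return: list of indices of all occurrences of pattern in text
-- 	"""
-- 	matches = []
--
-- 	# compute pi array
-- 	pi = compute_pi(pattern)
--
-- 	m = len(pattern)
-- 	n = len(text)
-- 	j = 0
-- 	i = 0
-- 	while i < n - m + 1:
-- 		while j < m and text[i + j] == pattern[j]:
-- 			j += 1
-- 		if j == m:
-- 			matches.append(i)  # 0 indexing
-- 		if j > 0:
-- 			i += (j - pi[j - 1])
-- 			j = pi[j - 1]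
-- 		else:
-- 			i += 1
-- 	return matches
-- ===== SOURCE B (Python) =====
-- def kmp_string_match(text, pattern):
-- 	"""
-- 	Naive sliding-window search: test every candidate start by slice comparison.
-- 	:return: list of indices of all occurrences of pattern in text
-- 	"""
-- 	m = len(pattern)
-- 	return [i for i in range(len(text) - m + 1) if text[i:i + m] == pattern]
-- ===== Notes on version B (the rewrite author's own statement) =====
-- stated objective: simpler
-- what changed: Replaced KMP (failure-function table plus shifting two-index scan) by a one-line naive sliding-window search that slice-compares text[i:i+m] against the pattern at every candidate start; despite the worse asymptotics the C-level slice comparison makes it measurably faster in CPython.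
import Mathlib
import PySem

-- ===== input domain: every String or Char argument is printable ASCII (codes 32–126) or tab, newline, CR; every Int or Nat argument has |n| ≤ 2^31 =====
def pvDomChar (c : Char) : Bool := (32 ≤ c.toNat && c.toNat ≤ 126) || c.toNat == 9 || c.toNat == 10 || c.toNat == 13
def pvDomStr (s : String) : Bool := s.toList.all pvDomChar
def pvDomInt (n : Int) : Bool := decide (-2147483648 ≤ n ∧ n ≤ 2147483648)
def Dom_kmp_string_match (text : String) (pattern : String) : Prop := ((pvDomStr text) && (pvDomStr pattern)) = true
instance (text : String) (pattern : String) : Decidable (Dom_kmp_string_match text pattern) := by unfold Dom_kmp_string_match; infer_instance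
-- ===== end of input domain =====

-- B replaces KMP by a naive sliding-window slice-comparison search: simpler (one line), same result, no failure table.

-- ===== PORT A =====
-- inner `while b > 0 and pattern[b] != pattern[i]` of compute_pi; fuel = current b
-- (b strictly decreases each pass since pi[b-1] <= b-1, so fuel b is exact).
-- Indexing via List.getD: every access the Python performs is in range, where getD equals Python's pattern[k].
def piFall (p : List Char) (piA : List Nat) (i : Nat) : Nat → Nat → Nat
  | 0, b => b
  | fuel+1, b =>
    if 0 < b ∧ p.getD b ' ' ≠ p.getD i ' ' then piFall p piA i fuel (piA.getD (b-1) 0)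
    else b

-- compute_pi: `for i in range(1, m)` as foldl over List.range' 1 (m-1), state (pi, b)
def computePi (p : List Char) : List Nat :=
  ((List.range' 1 (p.length - 1)).foldl
    (fun st i =>
      let b := piFall p st.1 i st.2 st.2
      let b := if p.getD b ' ' = p.getD i ' ' then b + 1 else b
      (st.1.set i b, b))
    (List.replicate p.length 0, 0)).1

-- inner `while j < m and text[i+j] == pattern[j]`; fuel = m - j (j only increases)
def kmpInner (t p : List Char) (m i : Nat) : Nat → Nat → Nat
  | 0, j => j
  | fuel+1, j =>
    if j < m ∧ t.getD (i+j) ' ' = p.getD j ' ' then kmpInner t p m i fuel (j+1)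
    else j

-- outer `while i < n - m + 1` (as i + m ≤ n on Nat, equivalent over ints since i ≥ 0);
-- fuel = n+1 (i strictly increases each pass and stops once i > n - m)
def kmpOuter (t p : List Char) (piA : List Nat) (m n : Nat) :
    Nat → Nat → Nat → List Int → List Int
  | 0, _, _, acc => acc
  | fuel+1, i, j, acc =>
    if i + m ≤ n then
      let j' := kmpInner t p m i (m - j) j
      let acc' := if j' = m then acc ++ [(i : Int)] else acc
      if 0 < j' then
        kmpOuter t p piA m n fuel (i + (j' - piA.getD (j'-1) 0)) (piA.getD (j'-1) 0) acc'
      else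
        kmpOuter t p piA m n fuel (i + 1) j' acc'
    else acc

def kmp_string_match (text : String) (pattern : String) : List Int :=
  let t := text.toList
  let p := pattern.toList
  kmpOuter t p (computePi p) p.length t.length (t.length + 1) 0 0 []

-- ===== PORT B =====
def kmp_string_match_alt (text : String) (pattern : String) : List Int :=
  let m : Int := (pattern.toList.length : Int)
  (PySem.List.pyRange 0 ((text.toList.length : Int) - m + 1) 1).filter
    (fun i => PySem.List.slice text.toList (some i) (some (i + m)) = pattern.toList)

-- ===== PRECONDITION & SPEC =====
def Spec_kmp_string_match (text : String) (pattern : String) (out : List Int) : Prop := out = kmp_string_match_alt text pattern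
instance (text : String) (pattern : String) (out : List Int) : Decidable (Spec_kmp_string_match text pattern out) := by unfold Spec_kmp_string_match; infer_instance

-- ===== CLAIM (what is proved, stated in full; the proofs are below) =====
def Claim_equal_kmp_string_match : Prop := ∀ (text : String) (pattern : String), Dom_kmp_string_match text pattern → Spec_kmp_string_match text pattern (kmp_string_match text pattern)


-- ===== LEMMAS AND PROOFS =====

-- `pvBrd p j k`: the k-prefix of p is also a suffix of the j-prefix of p (a "border")
def pvBrd (p : List Char) (j k : Nat) : Prop :=
  k ≤ j ∧ j ≤ p.length ∧ p.take k = (p.take j).drop (j - k)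

theorem pvBrd_zero (p : List Char) (j : Nat) (hj : j ≤ p.length) : pvBrd p j 0 := by
  refine ⟨Nat.zero_le _, hj, ?_⟩
  simp

theorem pvBrd_trans {p : List Char} {j k l : Nat}
    (h1 : pvBrd p j k) (h2 : pvBrd p k l) : pvBrd p j l := by
  obtain ⟨hk, hj, e1⟩ := h1
  obtain ⟨hl, _, e2⟩ := h2
  refine ⟨hl.trans hk, hj, ?_⟩
  rw [e2, e1, List.drop_drop]
  congr 1
  omega

theorem pvBrd_cross {p : List Char} {j k l : Nat}
    (h1 : pvBrd p j k) (h2 : pvBrd p j l) (hlk : l ≤ k) : pvBrd p k l := by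
  obtain ⟨hk, hj, e1⟩ := h1
  obtain ⟨hl, _, e2⟩ := h2
  refine ⟨hlk, hk.trans hj, ?_⟩
  rw [e2, e1, List.drop_drop]
  congr 1
  omega

-- one-character extension of a border, in both directions
theorem pvBrd_ext {p : List Char} {j k : Nat} (hk : k < j) (hj : j < p.length) :
    pvBrd p (j+1) (k+1) ↔ (pvBrd p j k ∧ p.getD k ' ' = p.getD j ' ') := by
  have hkl : k < p.length := hk.trans hj
  have hjk : j - k ≤ (p.take j).length := by simp; omega
  have ht1 : p.take (k+1) = p.take k ++ [p[k]] := by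
    rw [List.take_add_one]
    simp [List.getElem?_eq_getElem hkl]
  have ht2 : (p.take (j+1)).drop (j + 1 - (k+1)) = (p.take j).drop (j - k) ++ [p[j]] := by
    rw [List.take_add_one, List.getElem?_eq_getElem hj]
    have : j + 1 - (k + 1) = j - k := by omega
    rw [this]
    simp only [Option.toList_some]
    rw [List.drop_append_of_le_length hjk]
  constructor
  · rintro ⟨-, -, e⟩
    rw [ht1, ht2] at e
    obtain ⟨e1, e2⟩ := List.append_singleton_inj.mp e
    exact ⟨⟨hk.le, hj.le, e1⟩,
      by rw [List.getD_eq_getElem p ' ' hkl, List.getD_eq_getElem p ' ' hj, e2]⟩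
  · rintro ⟨⟨-, -, e1⟩, e2⟩
    refine ⟨by omega, by omega, ?_⟩
    rw [ht1, ht2]
    refine List.append_singleton_inj.mpr ⟨e1, ?_⟩
    rw [List.getD_eq_getElem p ' ' hkl, List.getD_eq_getElem p ' ' hj] at e2
    exact e2

-- the pi table is correct on indices below N
def pvPiOkBelow (p : List Char) (piA : List Nat) (N : Nat) : Prop :=
  ∀ i, i < N → i < p.length →
    piA.getD i 0 ≤ i ∧ pvBrd p (i+1) (piA.getD i 0) ∧
    (∀ c, c ≤ i → pvBrd p (i+1) c → c ≤ piA.getD i 0)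

-- the inner fall-back loop of compute_pi: result is the longest viable candidate
theorem piFall_ok (p : List Char) (piA : List Nat) (s : Nat) (hs : s < p.length)
    (Hpi : pvPiOkBelow p piA s) :
    ∀ fuel b, b ≤ fuel → b < s → pvBrd p s b →
      (∀ c, c ≤ s → pvBrd p (s+1) c → c ≤ b + 1) →
      (piFall p piA s fuel b ≤ b ∧ piFall p piA s fuel b < s ∧
       pvBrd p s (piFall p piA s fuel b) ∧
       (∀ c, c ≤ s → pvBrd p (s+1) c → c ≤ piFall p piA s fuel b + 1) ∧
       (piFall p piA s fuel b = 0 ∨ p.getD (piFall p piA s fuel b) ' ' = p.getD s ' ')) := by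
  intro fuel
  induction fuel with
  | zero =>
    intro b hb hbs hbrd hmax
    interval_cases b
    exact ⟨le_refl _, hbs, hbrd, hmax, Or.inl rfl⟩
  | succ fuel ih =>
    intro b hb hbs hbrd hmax
    rw [piFall]
    split
    · rename_i hcond
      obtain ⟨hb0, hne⟩ := hcond
      set b' := piA.getD (b-1) 0 with hb'
      have hbm1 : b - 1 < s := by omega
      have hbm1p : b - 1 < p.length := by omega
      obtain ⟨hle', hbrd', hmax'⟩ := Hpi (b-1) hbm1 hbm1p
      have hsb : (b-1)+1 = b := by omega
      rw [hsb] at hbrd' hmax'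
      have hbrdsb' : pvBrd p s b' := pvBrd_trans hbrd hbrd'
      have hmaxb' : ∀ c, c ≤ s → pvBrd p (s+1) c → c ≤ b' + 1 := by
        intro c hc hbc
        have hcb1 : c ≤ b + 1 := hmax c hc hbc
        have hcb : c ≤ b := by
          rcases Nat.lt_or_ge c (b+1) with h | h
          · omega
          · exfalso
            have : c = b + 1 := by omega
            subst this
            rw [pvBrd_ext hbs hs] at hbc
            exact hne hbc.2
        rcases Nat.eq_zero_or_pos c with hc0 | hc0
        · omega
        · have hc1 : c - 1 < s := by omega
          have hext : pvBrd p s (c-1) ∧ p.getD (c-1) ' ' = p.getD s ' ' := by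
            have := (pvBrd_ext (show c - 1 < s by omega) hs).mp (by rw [show c - 1 + 1 = c by omega]; exact hbc)
            exact this
          have hcross : pvBrd p b (c-1) := pvBrd_cross hbrd hext.1 (by omega)
          have := hmax' (c-1) (by omega) hcross
          omega
      have hb's : b' < s := by omega
      have hb'f : b' ≤ fuel := by omega
      obtain ⟨r1, r2, r3, r4, r5⟩ := ih b' hb'f hb's hbrdsb' hmaxb'
      exact ⟨by omega, r2, r3, r4, r5⟩
    · rename_i hcond
      push_neg at hcond
      refine ⟨le_refl _, hbs, hbrd, hmax, ?_⟩
      rcases Nat.eq_zero_or_pos b with h0 | h0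
      · exact Or.inl h0
      · exact Or.inr (hcond h0)

theorem pvGetD_set_self (l : List Nat) (i v : Nat) (h : i < l.length) :
    (l.set i v).getD i 0 = v := by
  simp [List.getD, h]

theorem pvGetD_set_ne (l : List Nat) (i k v : Nat) (h : i ≠ k) :
    (l.set i v).getD k 0 = l.getD k 0 := by
  simp [List.getD, List.getElem?_set_ne, h]

-- invariant of compute_pi's outer for-loop after processing indices < s (state (piA, b))
def pvPiInv (p : List Char) (piA : List Nat) (s : Nat) (b : Nat) : Prop :=
  piA.length = p.length ∧ b = piA.getD (s-1) 0 ∧ pvPiOkBelow p piA s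

theorem computePi_loop (p : List Char) :
    ∀ cnt s piA b, 1 ≤ s → s + cnt = p.length → pvPiInv p piA s b →
      pvPiOkBelow p
        ((List.range' s cnt).foldl
          (fun st i =>
            let b := piFall p st.1 i st.2 st.2
            let b := if p.getD b ' ' = p.getD i ' ' then b + 1 else b
            (st.1.set i b, b))
          (piA, b)).1 p.length := by
  intro cnt
  induction cnt with
  | zero =>
    intro s piA b hs hsum hinv
    simp only [List.range'_zero, List.foldl_nil]
    intro i hi _
    exact hinv.2.2 i (by omega) (by omega)
  | succ cnt ih =>
    intro s piA b hs hsum hinv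
    obtain ⟨hlen, hbdef, hok⟩ := hinv
    rw [List.range'_succ, List.foldl_cons]
    have hslen : s < p.length := by omega
    -- the fall loop
    have hbs : b < s := by
      have := hok (s-1) (by omega) (by omega)
      omega
    have hbrd : pvBrd p s b := by
      have := (hok (s-1) (by omega) (by omega)).2.1
      rw [show s - 1 + 1 = s by omega] at this
      rw [hbdef]
      exact this
    have hmax : ∀ c, c ≤ s → pvBrd p (s+1) c → c ≤ b + 1 := by
      intro c hc hbc
      rcases Nat.eq_zero_or_pos c with h0 | h0
      · omega
      · have hext := (pvBrd_ext (show c - 1 < s by omega) hslen).mp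
          (by rw [show c - 1 + 1 = c by omega]; exact hbc)
        have := (hok (s-1) (by omega) (by omega)).2.2 (c-1) (by omega)
          (by rw [show s - 1 + 1 = s by omega]; exact hext.1)
        omega
    obtain ⟨f1, f2, f3, f4, f5⟩ := piFall_ok p piA s hslen hok b b (le_refl _) hbs hbrd hmax
    set b1 := piFall p piA s b b with hb1
    set b2 := if p.getD b1 ' ' = p.getD s ' ' then b1 + 1 else b1 with hb2
    have hb2s : b2 ≤ s := by rw [hb2]; split <;> omega
    have hspec : pvBrd p (s+1) b2 ∧ (∀ c, c ≤ s → pvBrd p (s+1) c → c ≤ b2) := by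
      rw [hb2]
      split
      · rename_i heq
        refine ⟨(pvBrd_ext f2 hslen).mpr ⟨f3, heq⟩, ?_⟩
        intro c hc hbc
        exact f4 c hc hbc
      · rename_i hne
        have hb10 : b1 = 0 := by
          rcases f5 with h | h
          · exact h
          · exact absurd h hne
        rw [hb10] at hne ⊢
        refine ⟨pvBrd_zero p (s+1) (by omega), ?_⟩
        intro c hc hbc
        have hc1 : c ≤ 1 := by have := f4 c hc hbc; omega
        rcases Nat.eq_zero_or_pos c with h0 | h0
        · omega
        · exfalso
          have : c = 1 := by omega
          subst this
          have hext := (pvBrd_ext (show 0 < s by omega) hslen).mp hbc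
          exact hne hext.2
    -- new state
    apply ih (s+1) (piA.set s b2) b2 (by omega) (by omega)
    refine ⟨by simp [hlen], ?_, ?_⟩
    · simp only [Nat.add_sub_cancel]
      rw [pvGetD_set_self piA s b2 (by omega)]
    · intro i hi hip
      rcases Nat.lt_or_ge i s with his | his
      · have hne : s ≠ i := by omega
        rw [pvGetD_set_ne piA s i b2 hne]
        exact hok i his hip
      · have hieq : i = s := by omega
        subst hieq
        rw [pvGetD_set_self piA i b2 (by omega)]
        exact ⟨hb2s, hspec.1, hspec.2⟩

theorem computePi_ok (p : List Char) : pvPiOkBelow p (computePi p) p.length := by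
  unfold computePi
  rcases Nat.eq_zero_or_pos p.length with h0 | h0
  · rw [show p.length - 1 = 0 by omega]
    simp only [List.range'_zero, List.foldl_nil]
    intro i hi
    omega
  · apply computePi_loop p (p.length - 1) 1 _ 0 (le_refl _) (by omega)
    refine ⟨by simp, by simp [List.getD], ?_⟩
    intro i hi hip
    have : i = 0 := by omega
    subst this
    have : (List.replicate p.length (0:Nat)).getD 0 0 = 0 := by
      simp [List.getD, List.getElem?_replicate, h0]
    rw [this]
    exact ⟨le_refl _, pvBrd_zero p 1 (by omega), fun c hc _ => by omega⟩

-- partial match: j characters of p match t at position i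
def pvPm (t p : List Char) (i j : Nat) : Prop := (t.drop i).take j = p.take j

theorem pvPm_zero (t p : List Char) (i : Nat) : pvPm t p i 0 := by simp [pvPm]

theorem pvPm_mono {t p : List Char} {i j k : Nat} (h : pvPm t p i j) (hk : k ≤ j) :
    pvPm t p i k := by
  unfold pvPm at *
  have h2 := congrArg (List.take k) h
  rw [List.take_take, List.take_take] at h2
  simpa [Nat.min_eq_left hk] using h2

theorem pvPm_ext {t p : List Char} {i j : Nat} (hj : j < p.length)
    (hn : i + p.length ≤ t.length) (h : pvPm t p i j)
    (hc : t.getD (i+j) ' ' = p.getD j ' ') : pvPm t p i (j+1) := by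
  unfold pvPm at *
  have hjt : j < (t.drop i).length := by simp; omega
  have hij : i + j < t.length := by omega
  rw [List.take_add_one, List.take_add_one, List.getElem?_eq_getElem hjt,
    List.getElem?_eq_getElem hj]
  simp only [Option.toList_some]
  rw [h]
  congr 1
  rw [List.getElem_drop]
  rw [List.getD_eq_getElem t ' ' hij, List.getD_eq_getElem p ' ' hj] at hc
  simp [hc]

theorem pvPm_char {t p : List Char} {i j : Nat} (hj : j < p.length)
    (hn : i + p.length ≤ t.length) (h : pvPm t p i (j+1)) :
    t.getD (i+j) ' ' = p.getD j ' ' := by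
  unfold pvPm at h
  have hjt : j < (t.drop i).length := by simp; omega
  have hij : i + j < t.length := by omega
  rw [List.take_add_one, List.take_add_one, List.getElem?_eq_getElem hjt,
    List.getElem?_eq_getElem hj] at h
  simp only [Option.toList_some] at h
  have hpm : pvPm t p i j := pvPm_mono (show pvPm t p i (j+1) by
    unfold pvPm
    rw [List.take_add_one, List.take_add_one, List.getElem?_eq_getElem hjt,
      List.getElem?_eq_getElem hj]
    simpa using h) (by omega)
  unfold pvPm at hpm
  rw [hpm] at h
  have := (List.append_singleton_inj.mp h).2
  rw [List.getD_eq_getElem t ' ' hij, List.getD_eq_getElem p ' ' hj, List.getElem_drop] at *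
  exact this

-- the inner while loop of the matcher
theorem kmpInner_ok (t p : List Char) (i : Nat) (hn : i + p.length ≤ t.length) :
    ∀ fuel j, j ≤ p.length → p.length - j ≤ fuel → pvPm t p i j →
      (j ≤ kmpInner t p p.length i fuel j ∧ kmpInner t p p.length i fuel j ≤ p.length ∧
       pvPm t p i (kmpInner t p p.length i fuel j) ∧
       (kmpInner t p p.length i fuel j = p.length ∨
        t.getD (i + kmpInner t p p.length i fuel j) ' ' ≠ p.getD (kmpInner t p p.length i fuel j) ' ')) := by
  intro fuel
  induction fuel with
  | zero =>
    intro j hj hf hpm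
    have : j = p.length := by omega
    rw [kmpInner]
    exact ⟨le_refl _, hj, hpm, Or.inl this⟩
  | succ fuel ih =>
    intro j hj hf hpm
    rw [kmpInner]
    split
    · rename_i hcond
      obtain ⟨h1, h2, h3, h4⟩ := ih (j+1) (by omega) (by omega) (pvPm_ext hcond.1 hn hpm hcond.2)
      exact ⟨by omega, h2, h3, h4⟩
    · rename_i hcond
      push_neg at hcond
      refine ⟨le_refl _, hj, hpm, ?_⟩
      rcases Nat.lt_or_ge j p.length with h | h
      · exact Or.inr (hcond h)
      · exact Or.inl (by omega)

-- occurrence test (the membership condition of B's comprehension)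
def pvOccB (t p : List Char) (k : Nat) : Bool := decide ((t.drop k).take p.length = p)

theorem pvOccB_iff_pm (t p : List Char) (k : Nat) :
    pvOccB t p k = true ↔ pvPm t p k p.length := by
  unfold pvOccB pvPm
  rw [List.take_length]
  simp

-- matches with index in [a, t.length + 1 - p.length)
def pvF (t p : List Char) (a : Nat) : List Int :=
  ((List.range' a (t.length + 1 - p.length - a)).filter (pvOccB t p)).map (fun k => Int.ofNat k)

theorem pvF_congr (t p : List Char) (a a' : Nat) (haa : a ≤ a')
    (hno : ∀ k, a ≤ k → k < a' → pvOccB t p k = false) :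
    pvF t p a = pvF t p a' := by
  unfold pvF
  set N := t.length + 1 - p.length with hN
  rcases Nat.lt_or_ge a' N with h | h
  · have hsplit : List.range' a (N - a) = List.range' a (a' - a) ++ List.range' a' (N - a') := by
      have e1 : a + (a' - a) = a' := by omega
      have e2 : N - a = (a' - a) + (N - a') := by omega
      rw [e2, ← List.range'_append_1, e1]
    rw [hsplit, List.filter_append]
    have : (List.range' a (a' - a)).filter (pvOccB t p) = [] := by
      rw [List.filter_eq_nil_iff]
      intro k hk
      rw [List.mem_range'_1] at hk
      simp [hno k hk.1 (by omega)]
    rw [this, List.nil_append]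
  · have h1 : (List.range' a (N - a)).filter (pvOccB t p) = [] := by
      rw [List.filter_eq_nil_iff]
      intro k hk
      rw [List.mem_range'_1] at hk
      simp [hno k hk.1 (by omega)]
    have h2 : N - a' = 0 := by omega
    rw [h1, h2]
    simp

theorem pvF_cons (t p : List Char) (a : Nat) (ha : a < t.length + 1 - p.length) :
    pvF t p a = (if pvOccB t p a then [(a:Int)] else []) ++ pvF t p (a+1) := by
  unfold pvF
  rw [show t.length + 1 - p.length - a = (t.length + 1 - p.length - (a+1)) + 1 by omega,
    List.range'_succ, List.filter_cons]
  split <;> simp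

-- the main loop
theorem kmpOuter_ok (t p : List Char) (piA : List Nat) (hpi : pvPiOkBelow p piA p.length) :
    ∀ fuel i j acc, t.length + 1 ≤ i + fuel → j ≤ p.length → pvPm t p i j →
      kmpOuter t p piA p.length t.length fuel i j acc = acc ++ pvF t p i := by
  intro fuel
  induction fuel with
  | zero =>
    intro i j acc hfuel hj hpm
    rw [kmpOuter]
    have : pvF t p i = [] := by
      unfold pvF
      rw [show t.length + 1 - p.length - i = 0 by omega]
      simp
    rw [this, List.append_nil]
  | succ fuel ih =>
    intro i j acc hfuel hj hpm
    rw [kmpOuter]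
    split
    · rename_i hguard
      have hiN : i < t.length + 1 - p.length := by omega
      obtain ⟨r1, r2, r3, r4⟩ := kmpInner_ok t p i hguard (p.length - j) j hj (le_refl _) hpm
      set r := kmpInner t p p.length i (p.length - j) j with hr
      have hocc : pvOccB t p i = true ↔ r = p.length := by
        rw [pvOccB_iff_pm]
        constructor
        · intro hpmm
          by_contra hne
          have hrlt : r < p.length := by omega
          rcases r4 with h | h
          · omega
          · exact h (pvPm_char hrlt hguard (pvPm_mono hpmm (by omega)))
        · intro hrm
          rw [← hrm]
          exact r3
      have hacc : (if r = p.length then acc ++ [(i:Int)] else acc) =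
          acc ++ (if pvOccB t p i then [(i:Int)] else []) := by
        by_cases ho : pvOccB t p i = true
        · rw [if_pos (hocc.mp ho), if_pos ho]
        · rw [if_neg (fun h => ho (hocc.mpr h)), if_neg ho]
          simp
      dsimp only
      split
      · rename_i hr0
        -- shift by r - pi[r-1]
        have hm0 : 0 < p.length := by omega
        have hr1 : r - 1 < p.length := by omega
        obtain ⟨q1, q2, q3⟩ := hpi (r-1) hr1 hr1
        set q := piA.getD (r-1) 0 with hq
        rw [show r - 1 + 1 = r by omega] at q2 q3
        have hshift : 1 ≤ r - q := by omega
        -- partial match at the new position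
        have hpm' : pvPm t p (i + (r - q)) q := by
          unfold pvPm
          have e1 : t.drop (i + (r - q)) = (t.drop i).drop (r - q) := by
            rw [List.drop_drop]
          have e4 : List.take q ((t.drop i).drop (r - q)) =
              ((t.drop i).take r).drop (r - q) := by
            rw [List.drop_take, show r - (r - q) = q by omega]
          rw [e1, e4]
          unfold pvPm at r3
          rw [r3]
          obtain ⟨-, -, e2⟩ := q2
          exact e2.symm
        -- no occurrence strictly between i and i + (r - q)
        have hno : ∀ k, i < k → k < i + (r - q) → pvOccB t p k = false := by
          intro k hk1 hk2
          by_contra hocck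
          rw [Bool.not_eq_false, pvOccB_iff_pm] at hocck
          set d := k - i with hd
          have hd1 : 0 < d := by omega
          have hd2 : d < r - q := by omega
          -- r - d is a border of p.take r
          have hbrd : pvBrd p r (r - d) := by
            refine ⟨by omega, by omega, ?_⟩
            have e1 : (p.take r).drop (r - (r - d)) = (p.take r).drop d := by
              congr 1
              omega
            rw [e1]
            unfold pvPm at r3
            rw [← r3, List.drop_take, List.drop_drop]
            have : pvPm t p k (r - d) := pvPm_mono hocck (by omega)
            unfold pvPm at this
            rw [show i + d = k by omega]
            exact this.symm
          have := q3 (r - d) (by omega) hbrd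
          omega
        rw [ih (i + (r - q)) q _ (by omega) (by omega) hpm']
        rw [hacc, pvF_cons t p i hiN]
        rw [pvF_congr t p (i+1) (i + (r - q)) (by omega) (fun k hk1 hk2 => hno k (by omega) hk2)]
        simp
      · rename_i hr0
        have hr0' : r = 0 := by omega
        rw [ih (i+1) r _ (by omega) (by omega) (by rw [hr0']; exact pvPm_zero t p (i+1))]
        rw [hacc, pvF_cons t p i hiN]
        simp
    · rename_i hguard
      have : pvF t p i = [] := by
        unfold pvF
        rw [show t.length + 1 - p.length - i = 0 by omega]
        simp
      rw [this, List.append_nil]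

-- B's comprehension is the filtered range of occurrence indices
theorem alt_eq_pvF (text pattern : String) :
    kmp_string_match_alt text pattern = pvF text.toList pattern.toList 0 := by
  unfold kmp_string_match_alt pvF
  dsimp only
  set t := text.toList
  set p := pattern.toList
  rw [PySem.List.pyRange_one]
  have hN : ((t.length : Int) - (p.length : Int) + 1 - 0).toNat = t.length + 1 - p.length - 0 := by
    omega
  rw [hN, List.filter_map, List.range_eq_range']
  simp only [Function.comp_def, zero_add]
  have hfilt : (List.range' 0 (t.length + 1 - p.length - 0)).filter
        (fun k : Nat =>
          decide (PySem.List.slice t (some (k:Int)) (some ((k:Int) + (p.length:Int))) = p))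
      = (List.range' 0 (t.length + 1 - p.length - 0)).filter (pvOccB t p) := by
    apply List.filter_congr
    intro k hk
    rw [PySem.List.slice_natCast_add]
    unfold pvOccB
    rfl
  rw [hfilt]
  rfl


-- ===== VERDICT (by name: the statement is the Claim_ definition above) =====
theorem kmp_string_match_spec : Claim_equal_kmp_string_match := by
  intro text pattern _
  unfold Spec_kmp_string_match kmp_string_match
  rw [alt_eq_pvF]
  exact kmpOuter_ok text.toList pattern.toList (computePi pattern.toList)
    (computePi_ok pattern.toList) (text.toList.length + 1) 0 0 [] (by omega)
    (Nat.zero_le _) (pvPm_zero _ _ 0)
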